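-- pv_equiv track=rewrite | github.com/arterm-sedov/cmw-rag | rag_engine/api/harmony_parser.py | _find_markers
-- ===== SOURCE A (Python) =====
-- CHANNEL_MARKERS: tuple[str, ...] = (
--     "assistantfinal",
--     "assistantanalysis",
--     "assistantcommentary",
-- )
--
-- def _find_markers(text: str) -> list[tuple[int, str]]:
--     """Locate all Harmony channel markers, skipping tool-response false positives.
--
--     Tool responses flatten to ``functions.xxx to=assistantcommentary{...}`` —
--     the ``to=`` prefix distinguishes them from real channel boundaries.
--     """
--     hits: list[tuple[int, str]] = []
--     for marker in CHANNEL_MARKERS: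
--         start = 0
--         while True:
--             idx = text.find(marker, start)
--             if idx == -1:
--                 break
--             if idx >= 3 and text[idx - 3 : idx] == "to=":
--                 start = idx + len(marker)
--                 continue
--             hits.append((idx, marker))
--             start = idx + len(marker)
--     hits.sort()
--     return hits
-- ===== SOURCE B (Python) =====
-- CHANNEL_MARKERS: tuple[str, ...] = (
--     "assistantfinal",
--     "assistantanalysis",
--     "assistantcommentary",
-- )
--
-- def _find_markers(text: str) -> list[tuple[int, str]]:
--     """Single left-to-right scan: at each position try the three markers,
--     apply the to= guard, and emit hits already in ascending order (no sort)."""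
--     hits: list[tuple[int, str]] = []
--     i, n = 0, len(text)
--     while i < n:
--         for marker in CHANNEL_MARKERS:
--             if text.startswith(marker, i):
--                 if not (i >= 3 and text.startswith("to=", i - 3)):
--                     hits.append((i, marker))
--                 i += len(marker)
--                 break
--         else:
--             i += 1
--     return hits
-- ===== Notes on version B (the rewrite author's own statement) =====
-- stated objective: alternative
-- what changed: Replaced A's three per-marker find() scan loops plus a final sort with a single left-to-right scan that tries all three markers at each position and emits hits already in ascending order, so no sort is needed.
import Mathlib
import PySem

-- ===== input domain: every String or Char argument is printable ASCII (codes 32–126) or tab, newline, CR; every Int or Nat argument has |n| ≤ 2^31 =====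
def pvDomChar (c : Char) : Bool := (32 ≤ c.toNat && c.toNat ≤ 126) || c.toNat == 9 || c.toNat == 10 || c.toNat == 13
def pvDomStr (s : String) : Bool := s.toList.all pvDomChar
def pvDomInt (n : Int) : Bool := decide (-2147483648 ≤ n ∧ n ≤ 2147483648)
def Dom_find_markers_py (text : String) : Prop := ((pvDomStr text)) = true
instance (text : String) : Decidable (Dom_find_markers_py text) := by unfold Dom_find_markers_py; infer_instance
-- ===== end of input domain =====

-- B replaces A's three per-marker find() loops plus a final sort by one left-to-right scan
-- that emits hits already in ascending order (objective: alternative; return value only).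

def pvMarkers : List String := ["assistantfinal", "assistantanalysis", "assistantcommentary"]

-- ===== PORT A =====
theorem pvFindFrom_le (s m : List Char) (start : Nat)
    (h : PySem.Chars.findFrom s m (start : Int) none ≠ -1) : start ≤ s.length := by
  by_contra hlt
  apply h
  simp [PySem.Chars.findFrom]
  omega

theorem pvMarkers_len : ∀ m ∈ pvMarkers, 1 ≤ m.toList.length := by decide

-- the inner `while True` loop of A for one marker (start = idx + len(marker) uses idx ≥ 0, so .toNat is exact)
def pvFindLoop (s : List Char) (marker : String) (start : Nat)
    (hits : List (Int × String)) : List (Int × String) :=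
  -- totality guard only: every caller passes a nonempty marker
  if _hm : marker.toList.length = 0 then hits
  else
    let idx := PySem.Chars.findFrom s marker.toList (start : Int) none
    if _h : idx = -1 then hits
    else if 3 ≤ idx ∧ PySem.List.slice s (some (idx - 3)) (some idx) = "to=".toList then
      pvFindLoop s marker (idx.toNat + marker.toList.length) hits
    else
      pvFindLoop s marker (idx.toNat + marker.toList.length) (hits ++ [(idx, marker)])
termination_by s.length + marker.toList.length - start
decreasing_by
  all_goals
    have h1 := pvFindFrom_le s marker.toList start _h
    have h2 := (PySem.Chars.findFrom_natCast_spec s marker.toList start h1 _h).1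
    omega

def find_markers_py (text : String) : List (Int × String) :=
  let hits := pvMarkers.foldl (fun hits marker => pvFindLoop text.toList marker 0 hits) []
  PySem.List.sorted2 hits (fun x => x.1) (fun x => x.2)

-- ===== PORT B =====
-- the `while i < n` loop of B; `text.startswith(sub, k)` with 0 ≤ k is exactly:
-- sub is a prefix of the text after dropping k characters
def pvScan (s : List Char) (i : Nat) : List (Int × String) :=
  if _hlt : i < s.length then
    match hf : pvMarkers.find? (fun m => PySem.Chars.startswith (List.drop i s) m.toList) with
    | some m =>
        let rest := pvScan s (i + m.toList.length)
        if 3 ≤ i ∧ PySem.Chars.startswith (List.drop (i - 3) s) "to=".toList then rest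
        else ((i : Int), m) :: rest
    | none => pvScan s (i + 1)
  else []
termination_by s.length - i
decreasing_by
  · have := pvMarkers_len m (List.mem_of_find?_eq_some hf)
    omega
  · omega

def find_markers_py_alt (text : String) : List (Int × String) := pvScan text.toList 0

-- ===== PRECONDITION & SPEC =====
def Spec_find_markers_py (text : String) (out : List (Int × String)) : Prop := out = find_markers_py_alt text
instance (text : String) (out : List (Int × String)) : Decidable (Spec_find_markers_py text out) := by unfold Spec_find_markers_py; infer_instance

-- ===== CLAIM (what is proved, stated in full; the proofs are below) =====
def Claim_equal_find_markers_py : Prop := ∀ (text : String), Dom_find_markers_py text → Spec_find_markers_py text (find_markers_py text)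

-- ===== LEMMAS AND PROOFS =====

-- `marker matches at i` and the tool-response guard, as Bools
def pvMatchB (s : List Char) (i : Nat) (m : String) : Bool := decide (m.toList <+: List.drop i s)
def pvGuardB (s : List Char) (i : Nat) : Bool := decide (3 ≤ i) && decide ("to=".toList <+: List.drop (i - 3) s)
def pvEmit (s : List Char) (m : String) (i : Nat) : Option (Int × String) :=
  if pvMatchB s i m && !pvGuardB s i then some ((i : Int), m) else none
def pvOcc (s : List Char) (m : String) (start : Nat) : List (Int × String) :=
  (List.range' start (s.length - start)).filterMap (pvEmit s m)
def pvCanonF (s : List Char) (i : Nat) : Option (Int × String) :=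
  (pvEmit s "assistantfinal" i).or ((pvEmit s "assistantanalysis" i).or (pvEmit s "assistantcommentary" i))
def pvCanon (s : List Char) (start : Nat) : List (Int × String) :=
  (List.range' start (s.length - start)).filterMap (pvCanonF s)

-- concrete string facts, by computation
theorem pvNoOverlap_dec : ∀ m1 ∈ pvMarkers, ∀ m2 ∈ pvMarkers, ∀ d < m1.toList.length, 0 < d →
    ¬(m2.toList <+: List.drop d m1.toList) ∧ ¬(List.drop d m1.toList <+: m2.toList) := by decide

theorem pvPrefix_dec : ∀ m1 ∈ pvMarkers, ∀ m2 ∈ pvMarkers, m1.toList <+: m2.toList → m1 = m2 := by decide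

-- no marker occurrence starts strictly inside another marker occurrence
theorem pvNoOverlap (s : List Char) (i j : Nat) (m1 m2 : String)
    (h1 : m1 ∈ pvMarkers) (h2 : m2 ∈ pvMarkers)
    (p1 : pvMatchB s i m1 = true) (p2 : pvMatchB s j m2 = true)
    (hij : i < j) (hj : j < i + m1.toList.length) : False := by
  simp only [pvMatchB, decide_eq_true_eq] at p1 p2
  obtain ⟨t, ht⟩ := p1
  have hd : List.drop j s = List.drop (j-i) m1.toList ++ t := by
    have h1 : List.drop j s = List.drop (j-i) (List.drop i s) := by
      rw [List.drop_drop]; congr 1; omega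
    rw [h1, ← ht, List.drop_append_of_le_length (by omega)]
  have h2' : m2.toList <+: List.drop (j-i) m1.toList ++ t := hd ▸ p2
  have hc := List.prefix_or_prefix_of_prefix h2' (List.prefix_append _ _)
  have hdec := pvNoOverlap_dec m1 h1 m2 h2 (j-i) (by omega) (by omega)
  tauto

-- at most one marker matches at a given position
theorem pvUnique (s : List Char) (i : Nat) (m1 m2 : String)
    (h1 : m1 ∈ pvMarkers) (h2 : m2 ∈ pvMarkers)
    (p1 : pvMatchB s i m1 = true) (p2 : pvMatchB s i m2 = true) : m1 = m2 := by
  simp only [pvMatchB, decide_eq_true_eq] at p1 p2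
  rcases List.prefix_or_prefix_of_prefix p1 p2 with h | h
  · exact pvPrefix_dec m1 h1 m2 h2 h
  · exact (pvPrefix_dec m2 h2 m1 h1 h).symm

-- a match fits inside the text
theorem pvMatch_le (s : List Char) (i : Nat) (m : String) (hm : m ∈ pvMarkers)
    (p : pvMatchB s i m = true) : i + m.toList.length ≤ s.length := by
  simp only [pvMatchB, decide_eq_true_eq] at p
  have h1 := p.length_le
  have h2 := pvMarkers_len m hm
  rw [List.length_drop] at h1
  omega

-- generic skip lemma for filterMap over an index range
theorem pvFilterSkip {β : Type} (f : Nat → Option β) (a i0 L n : Nat)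
    (ha : a ≤ i0) (hi0 : i0 < n) (hL : 1 ≤ L)
    (hpre : ∀ j, a ≤ j → j < i0 → f j = none)
    (hmid : ∀ j, i0 < j → j < i0 + L → f j = none) :
    (List.range' a (n - a)).filterMap f
      = (f i0).toList ++ (List.range' (i0 + L) (n - (i0 + L))).filterMap f := by
  have h1 : List.range' a (n - a) = List.range' a (i0 - a) ++ List.range' i0 (n - i0) := by
    have h := List.range'_append (s := a) (m := i0 - a) (n := n - i0) (step := 1)
    rw [show a + 1 * (i0 - a) = i0 by omega] at h
    rw [show n - a = (i0 - a) + (n - i0) by omega]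
    exact h.symm
  have h2 : (List.range' a (i0 - a)).filterMap f = [] := by
    refine List.filterMap_eq_nil_iff.mpr ?_
    intro j hj; rw [List.mem_range'_1] at hj; exact hpre j hj.1 (by omega)
  set k := min (L - 1) (n - i0 - 1) with hk
  have h3 : List.range' i0 (n - i0) = i0 :: (List.range' (i0+1) k ++ List.range' (i0+1+k) (n - i0 - 1 - k)) := by
    have h := List.range'_append (s := i0+1) (m := k) (n := n - i0 - 1 - k) (step := 1)
    rw [show (i0+1) + 1 * k = i0+1+k by omega] at h
    rw [show n - i0 = (k + (n - i0 - 1 - k)) + 1 by omega, List.range'_succ, ← h,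
      show k + (n - i0 - 1 - k) + 1 - 1 - k = n - i0 - 1 - k by omega]
  have h4 : (List.range' (i0+1) k).filterMap f = [] := by
    refine List.filterMap_eq_nil_iff.mpr ?_
    intro j hj; rw [List.mem_range'_1] at hj; exact hmid j (by omega) (by omega)
  have h5 : (List.range' (i0+1+k) (n - i0 - 1 - k)).filterMap f = (List.range' (i0 + L) (n - (i0 + L))).filterMap f := by
    rcases Nat.lt_or_ge n (i0 + L) |>.symm with hle | hlt
    · rw [show i0+1+k = i0 + L by omega, show n - i0 - 1 - k = n - (i0 + L) by omega]
    · simp [show n - i0 - 1 - k = 0 by omega, show n - (i0 + L) = 0 by omega]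
  rw [h1, List.filterMap_append, h2, h3, List.nil_append, List.filterMap_cons, List.filterMap_append, h4, List.nil_append, h5]
  cases hf : f i0 <;> simp

theorem pvEmit_none (s : List Char) (m : String) (i : Nat) (h : pvMatchB s i m = false) :
    pvEmit s m i = none := by simp [pvEmit, h]

theorem pvMatchB_false_of_ne (s : List Char) (i : Nat) (m m' : String)
    (hm : m ∈ pvMarkers) (hm' : m' ∈ pvMarkers) (hne : m' ≠ m)
    (hp : pvMatchB s i m = true) : pvMatchB s i m' = false := by
  by_contra h
  exact hne (pvUnique s i m' m hm' hm (by simpa using h) hp)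

theorem pvCanonF_match (s : List Char) (i : Nat) (m : String)
    (hm : m ∈ pvMarkers) (hp : pvMatchB s i m = true) : pvCanonF s i = pvEmit s m i := by
  have hu : ∀ m' ∈ pvMarkers, m' ≠ m → pvMatchB s i m' = false := fun m' h1 h2 =>
    pvMatchB_false_of_ne s i m m' hm h1 h2 hp
  simp only [pvMarkers, List.mem_cons, List.not_mem_nil, or_false] at hm
  rcases hm with h | h | h <;> subst h <;> simp only [pvCanonF]
  · have e2 := pvEmit_none s "assistantanalysis" i (hu _ (by decide) (by decide))
    have e3 := pvEmit_none s "assistantcommentary" i (hu _ (by decide) (by decide))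
    rw [e2, e3]; cases pvEmit s "assistantfinal" i <;> rfl
  · have e1 := pvEmit_none s "assistantfinal" i (hu _ (by decide) (by decide))
    have e3 := pvEmit_none s "assistantcommentary" i (hu _ (by decide) (by decide))
    rw [e1, e3]; cases pvEmit s "assistantanalysis" i <;> rfl
  · have e1 := pvEmit_none s "assistantfinal" i (hu _ (by decide) (by decide))
    have e2 := pvEmit_none s "assistantanalysis" i (hu _ (by decide) (by decide))
    rw [e1, e2]; cases pvEmit s "assistantcommentary" i <;> rfl

theorem pvCanonF_none (s : List Char) (i : Nat)
    (h : ∀ m ∈ pvMarkers, pvMatchB s i m = false) : pvCanonF s i = none := by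
  rw [pvCanonF, pvEmit_none s _ i (h _ (by decide)), pvEmit_none s _ i (h _ (by decide)),
    pvEmit_none s _ i (h _ (by decide))]
  rfl

-- ===== A-side characterisation =====
theorem pvGuard_iff (s : List Char) (i : Nat) :
    ((3:Int) ≤ (i:Int) ∧ PySem.List.slice s (some ((i:Int) - 3)) (some (i:Int)) = "to=".toList)
      ↔ pvGuardB s i = true := by
  constructor
  · rintro ⟨h3, hsl⟩
    have h3' : 3 ≤ i := by omega
    rw [show ((i:Int) - 3) = ((i - 3 : Nat) : Int) by omega, PySem.List.slice_natCast,
      show i - (i - 3) = 3 by omega] at hsl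
    simp only [pvGuardB, Bool.and_eq_true, decide_eq_true_eq]
    refine ⟨h3', ?_⟩
    rw [List.prefix_iff_eq_take]
    simpa using hsl.symm
  · intro h
    simp only [pvGuardB, Bool.and_eq_true, decide_eq_true_eq] at h
    obtain ⟨h3', hp⟩ := h
    refine ⟨by omega, ?_⟩
    rw [show ((i:Int) - 3) = ((i - 3 : Nat) : Int) by omega, PySem.List.slice_natCast,
      show i - (i - 3) = 3 by omega]
    rw [List.prefix_iff_eq_take] at hp
    simpa using hp.symm

theorem pvFindLoop_eq (s : List Char) (m : String) (hm : m ∈ pvMarkers) :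
    ∀ start hits, pvFindLoop s m start hits = hits ++ pvOcc s m start := by
  have hL := pvMarkers_len m hm
  suffices h : ∀ k start, s.length + m.toList.length - start < k →
      ∀ hits, pvFindLoop s m start hits = hits ++ pvOcc s m start by
    intro start hits
    exact h (s.length + m.toList.length - start + 1) start (by omega) hits
  intro k
  induction k with
  | zero => omega
  | succ k ih =>
    intro start hs hits
    rw [pvFindLoop, dif_neg (show ¬ m.toList.length = 0 by omega)]
    dsimp only
    split
    case isTrue _h =>
      suffices hocc : pvOcc s m start = [] by rw [hocc, List.append_nil]
      rcases Nat.lt_or_ge s.length start with hgt | hle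
      · rw [pvOcc, show s.length - start = 0 by omega, List.range'_zero, List.filterMap_nil]
      · have hni := (PySem.Chars.findFrom_natCast_eq_neg_one_iff s m.toList start hle).mp _h
        refine List.filterMap_eq_nil_iff.mpr ?_
        intro j hj
        rw [List.mem_range'_1] at hj
        refine pvEmit_none s m j ?_
        by_contra hmt
        apply hni
        have hpre : m.toList <+: List.drop (j - start) (List.drop start s) := by
          rw [List.drop_drop, show start + (j - start) = j by omega]
          simpa [pvMatchB] using hmt
        exact hpre.isInfix.trans (List.drop_suffix _ _).isInfix
    case isFalse _h =>
      have hle := pvFindFrom_le s m.toList start _h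
      obtain ⟨hge, hpref, hfirst⟩ := PySem.Chars.findFrom_natCast_spec s m.toList start hle _h
      set idx := PySem.Chars.findFrom s m.toList (start : Int) none with hidxdef
      set i0 := idx.toNat with hi0
      have hidxeq : idx = (i0 : Int) := (Int.toNat_of_nonneg (by omega)).symm
      have hp : pvMatchB s i0 m = true := by simpa [pvMatchB] using hpref
      have hfit := pvMatch_le s i0 m hm hp
      have hstart_le : start ≤ i0 := by omega
      have hocc : pvOcc s m start = (pvEmit s m i0).toList ++ pvOcc s m (i0 + m.toList.length) := by
        rw [pvOcc, pvFilterSkip (pvEmit s m) start i0 m.toList.length s.length hstart_le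
          (by omega) hL
          (fun j h1 h2 => pvEmit_none s m j (by
            have := hfirst j h1 (by omega)
            simpa [pvMatchB] using this))
          (fun j h1 h2 => pvEmit_none s m j (by
            by_contra hmt
            exact pvNoOverlap s i0 j m m hm hm hp (by simpa using hmt) h1 h2))]
        rfl
      split
      case isTrue hg =>
        rw [ih (i0 + m.toList.length) (by omega) hits, hocc]
        rw [hidxeq] at hg
        have hgb : pvGuardB s i0 = true := (pvGuard_iff s i0).mp hg
        rw [pvEmit, hp, hgb]
        rfl
      case isFalse hg =>
        rw [ih (i0 + m.toList.length) (by omega) (hits ++ [(idx, m)]), hocc]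
        have hgb : pvGuardB s i0 = false := by
          rcases hb : pvGuardB s i0
          · rfl
          · rw [hidxeq] at hg
            exact absurd ((pvGuard_iff s i0).mpr hb) hg
        rw [pvEmit, hp, hgb, hidxeq]
        simp

-- ===== B-side characterisation =====
theorem pvScan_eq (s : List Char) : ∀ i, pvScan s i = pvCanon s i := by
  suffices h : ∀ k i, s.length - i < k → pvScan s i = pvCanon s i by
    intro i; exact h (s.length - i + 1) i (by omega)
  intro k
  induction k with
  | zero => omega
  | succ k ih =>
    intro i hik
    rw [pvScan]
    split
    case isFalse hlt =>
      rw [pvCanon, show s.length - i = 0 by omega, List.range'_zero, List.filterMap_nil]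
    case isTrue hlt =>
      split
      case h_2 hf =>
        have hnone : ∀ m' ∈ pvMarkers, pvMatchB s i m' = false := by
          intro m' hm'
          have := List.find?_eq_none.mp hf m' hm'
          simpa [pvMatchB, PySem.Chars.startswith_iff] using this
        have hstep : pvCanon s i = pvCanon s (i + 1) := by
          have := pvFilterSkip (pvCanonF s) i i 1 s.length le_rfl hlt le_rfl
            (fun j h1 h2 => absurd h1 (by omega))
            (fun j h1 h2 => absurd h2 (by omega))
          rw [pvCanon, this, pvCanonF_none s i hnone, pvCanon]
          rfl
        rw [hstep, ih (i+1) (by omega)]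
      case h_1 m hf =>
        have hm : m ∈ pvMarkers := List.mem_of_find?_eq_some hf
        have hp : pvMatchB s i m = true := by
          have := List.find?_some hf
          simpa [pvMatchB, PySem.Chars.startswith_iff] using this
        have hL := pvMarkers_len m hm
        have hstep : pvCanon s i
            = (pvEmit s m i).toList ++ pvCanon s (i + m.toList.length) := by
          rw [pvCanon, pvFilterSkip (pvCanonF s) i i m.toList.length s.length le_rfl hlt hL
            (fun j h1 h2 => absurd h1 (by omega))
            (fun j h1 h2 => pvCanonF_none s j (by
              intro m' hm'
              by_contra hmt
              exact pvNoOverlap s i j m m' hm hm' hp (by simpa using hmt) h1 h2)),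
            pvCanonF_match s i m hm hp]
          rfl
        rw [hstep, ih (i + m.toList.length) (by omega)]
        have hgd : (3 ≤ i ∧ PySem.Chars.startswith (List.drop (i - 3) s) "to=".toList = true) ↔ pvGuardB s i = true := by
          simp [pvGuardB, PySem.Chars.startswith_iff]
        split
        case isTrue hg =>
          rw [pvEmit, hp]
          rw [show pvGuardB s i = true from hgd.mp (by simpa using hg)]
          rfl
        case isFalse hg =>
          have : pvGuardB s i = false := by
            rcases hb : pvGuardB s i
            · rfl
            · exact absurd (by simpa using hgd.mpr hb) hg
          rw [pvEmit, hp, this]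
          rfl

-- ===== sorting =====
theorem pvInsertBy_congr {α : Type} (f g : α → α → Bool) (x : α) (acc : List α)
    (hx : ∀ b ∈ acc, f x b = g x b) :
    PySem.List.insertBy f x acc = PySem.List.insertBy g x acc := by
  induction acc with
  | nil => rfl
  | cons y ys ih =>
    simp only [PySem.List.insertBy]
    rw [hx y (List.mem_cons_self)]
    split
    · rfl
    · rw [ih (fun b hb => hx b (List.mem_cons_of_mem _ hb))]

theorem pvSorted2_eq_sorted (xs : List (Int × String))
    (hinj : ∀ a ∈ xs, ∀ b ∈ xs, a.1 = b.1 → a = b) :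
    PySem.List.sorted2 xs (fun x => x.1) (fun x => x.2)
      = PySem.List.sorted xs (fun x => x.1) := by
  rw [PySem.List.sorted_eq_foldl_insertBy]
  show List.foldl (fun acc x => PySem.List.insertBy _ x acc) [] xs = _
  have key : ∀ a ∈ xs, ∀ b ∈ xs,
      (decide (a.1 < b.1) || (!decide (b.1 < a.1) && decide (a.2 < b.2)))
        = decide (a.1 < b.1) := by
    intro a ha b hb
    rcases lt_trichotomy a.1 b.1 with h | h | h
    · simp [h]
    · have hab : a = b := hinj a ha b hb h
      subst hab
      simp
    · simp [h, not_lt_of_gt h]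
  have gen : ∀ (l init : List (Int × String)),
      (∀ a ∈ l, ∀ b ∈ l, (decide (a.1 < b.1) || (!decide (b.1 < a.1) && decide (a.2 < b.2))) = decide (a.1 < b.1)) →
      (∀ a ∈ l, ∀ b ∈ init, (decide (a.1 < b.1) || (!decide (b.1 < a.1) && decide (a.2 < b.2))) = decide (a.1 < b.1)) →
      List.foldl (fun acc x => PySem.List.insertBy
          (fun a b => decide (a.1 < b.1) || (!decide (b.1 < a.1) && decide (a.2 < b.2))) x acc) init l
        = List.foldl (fun acc x => PySem.List.insertBy (fun a b => decide (a.1 < b.1)) x acc) init l := by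
    intro l
    induction l with
    | nil => intro init _ _; rfl
    | cons x t ih =>
      intro init hl hinit
      simp only [List.foldl_cons]
      rw [pvInsertBy_congr
        (fun a b => decide (a.1 < b.1) || (!decide (b.1 < a.1) && decide (a.2 < b.2)))
        (fun a b => decide (a.1 < b.1)) x init (fun b hb => hinit x (List.mem_cons_self) b hb)]
      apply ih
      · intro a ha b hb
        exact hl a (List.mem_cons_of_mem _ ha) b (List.mem_cons_of_mem _ hb)
      · intro a ha b hb
        rcases (PySem.List.mem_insertBy _ _ _ _).mp hb with rfl | hb'
        · exact hl a (List.mem_cons_of_mem _ ha) b (List.mem_cons_self)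
        · exact hinit a (List.mem_cons_of_mem _ ha) b hb'
  exact gen xs [] key (by intro a _ b hb; cases hb)

theorem pvFilterMap_or_perm {β : Type} (f g : Nat → Option β) (l : List Nat)
    (h : ∀ x ∈ l, f x = none ∨ g x = none) :
    (l.filterMap (fun x => (f x).or (g x))).Perm (l.filterMap f ++ l.filterMap g) := by
  induction l with
  | nil => simp
  | cons x t ih =>
    have hx := h x (List.mem_cons_self)
    have iht := ih (fun y hy => h y (List.mem_cons_of_mem _ hy))
    rcases hfx : f x with _ | a
    · rcases hgx : g x with _ | b
      · simpa [List.filterMap_cons, hfx, hgx, Option.or] using iht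
      · simp only [List.filterMap_cons, hfx, hgx, Option.or]
        exact (iht.cons b).trans List.perm_middle.symm
    · have hgx : g x = none := by
        rcases hx with h' | h'
        · rw [hfx] at h'; cases h'
        · exact h'
      simpa [List.filterMap_cons, hfx, hgx, Option.or] using iht.cons a

theorem pvEmit_some (s : List Char) (m : String) (i : Nat) (p : Int × String)
    (h : pvEmit s m i = some p) : p = ((i : Int), m) ∧ pvMatchB s i m = true := by
  rw [pvEmit] at h
  split at h
  · cases h
    rename_i hc
    simp only [Bool.and_eq_true] at hc
    exact ⟨rfl, hc.1⟩
  · cases h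

theorem pvMemConcat (s : List Char)
    (a : Int × String)
    (ha : a ∈ pvOcc s "assistantfinal" 0 ++ (pvOcc s "assistantanalysis" 0 ++ pvOcc s "assistantcommentary" 0)) :
    ∃ (i : Nat) (m : String), m ∈ pvMarkers ∧ a = ((i : Int), m) ∧ pvMatchB s i m = true := by
  simp only [List.mem_append] at ha
  rcases ha with h | h | h <;>
  · rw [pvOcc] at h
    obtain ⟨i, _, hemit⟩ := List.mem_filterMap.mp h
    obtain ⟨rfl, hmt⟩ := pvEmit_some s _ i a hemit
    exact ⟨i, _, by decide, rfl, hmt⟩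

theorem pvCanon_perm (s : List Char) :
    (pvCanon s 0).Perm (pvOcc s "assistantfinal" 0 ++ (pvOcc s "assistantanalysis" 0 ++ pvOcc s "assistantcommentary" 0)) := by
  have hdis1 : ∀ x ∈ List.range' 0 (s.length - 0), pvEmit s "assistantfinal" x = none ∨
      ((pvEmit s "assistantanalysis" x).or (pvEmit s "assistantcommentary" x)) = none := by
    intro x _
    rcases hb : pvMatchB s x "assistantfinal"
    · exact Or.inl (pvEmit_none s _ x hb)
    · refine Or.inr ?_
      rw [pvEmit_none s _ x (pvMatchB_false_of_ne s x _ _ (by decide) (by decide) (by decide) hb),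
        pvEmit_none s _ x (pvMatchB_false_of_ne s x _ _ (by decide) (by decide) (by decide) hb)]
      rfl
  have hdis2 : ∀ x ∈ List.range' 0 (s.length - 0), pvEmit s "assistantanalysis" x = none ∨
      pvEmit s "assistantcommentary" x = none := by
    intro x _
    rcases hb : pvMatchB s x "assistantanalysis"
    · exact Or.inl (pvEmit_none s _ x hb)
    · exact Or.inr (pvEmit_none s _ x (pvMatchB_false_of_ne s x _ _ (by decide) (by decide) (by decide) hb))
  have h1 := pvFilterMap_or_perm (pvEmit s "assistantfinal")
    (fun x => (pvEmit s "assistantanalysis" x).or (pvEmit s "assistantcommentary" x))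
    (List.range' 0 (s.length - 0)) hdis1
  have h2 := pvFilterMap_or_perm (pvEmit s "assistantanalysis") (pvEmit s "assistantcommentary")
    (List.range' 0 (s.length - 0)) hdis2
  exact (h1.trans (List.Perm.append_left _ h2))

theorem pvCanon_pairwise (s : List Char) :
    (pvCanon s 0).Pairwise (fun a b => a.1 < b.1) := by
  have hfst : ∀ i p, pvCanonF s i = some p → p.1 = (i : Int) := by
    intro i p h
    rw [pvCanonF] at h
    have e1 := pvEmit_some s "assistantfinal" i
    have e2 := pvEmit_some s "assistantanalysis" i
    have e3 := pvEmit_some s "assistantcommentary" i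
    rcases h1 : pvEmit s "assistantfinal" i with _ | q
    · rcases h2 : pvEmit s "assistantanalysis" i with _ | r
      · rcases h3 : pvEmit s "assistantcommentary" i with _ | u
        · rw [h1, h2, h3] at h; cases h
        · rw [h1, h2, h3] at h; simp only [Option.or] at h; cases h; rw [(e3 _ h3).1]
      · rw [h1, h2] at h; simp only [Option.or] at h; cases h; rw [(e2 _ h2).1]
    · rw [h1] at h; simp only [Option.or] at h; cases h; rw [(e1 _ h1).1]
  rw [pvCanon]
  refine List.pairwise_filterMap.mpr ?_
  refine (List.pairwise_lt_range' 1).imp ?_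
  intro i j hij b hb b' hb'
  rw [hfst i b hb, hfst j b' hb']
  exact_mod_cast hij

theorem pvOcc_inj (s : List Char) :
    ∀ a ∈ pvOcc s "assistantfinal" 0 ++ (pvOcc s "assistantanalysis" 0 ++ pvOcc s "assistantcommentary" 0),
    ∀ b ∈ pvOcc s "assistantfinal" 0 ++ (pvOcc s "assistantanalysis" 0 ++ pvOcc s "assistantcommentary" 0),
      a.1 = b.1 → a = b := by
  intro a ha b hb heq
  obtain ⟨i, m1, hm1, rfl, hp1⟩ := pvMemConcat s a ha
  obtain ⟨j, m2, hm2, rfl, hp2⟩ := pvMemConcat s b hb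
  simp only at heq
  have hij : i = j := by exact_mod_cast heq
  subst hij
  rw [pvUnique s i m1 m2 hm1 hm2 hp1 hp2]

-- ===== VERDICT (by name: the statement is the Claim_ definition above) =====
theorem find_markers_py_spec : Claim_equal_find_markers_py := by
  intro text _
  unfold Spec_find_markers_py find_markers_py find_markers_py_alt
  have hfold : pvMarkers.foldl (fun hits marker => pvFindLoop text.toList marker 0 hits) []
      = pvOcc text.toList "assistantfinal" 0 ++ (pvOcc text.toList "assistantanalysis" 0 ++ pvOcc text.toList "assistantcommentary" 0) := by
    simp only [pvMarkers, List.foldl]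
    rw [pvFindLoop_eq _ _ (by decide), pvFindLoop_eq _ _ (by decide), pvFindLoop_eq _ _ (by decide)]
    simp
  rw [hfold, pvSorted2_eq_sorted _ (pvOcc_inj text.toList),
    PySem.List.sorted_eq_of_perm_of_pairwise_lt _ _ _ (pvCanon_perm text.toList) (pvCanon_pairwise text.toList),
    pvScan_eq]
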